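-- pv_equiv track=rewrite | github.com/Jinnie-J/Algorithm-study | programmers/[BFS]FloodFill.py | solution
-- ===== SOURCE A (Python) =====
-- def solution(n, m, images):
--     dx = [1, 0, -1, 0]
--     dy = [0, 1, 0, -1]
--     count = 0
--
--     def dfs(arr, x, y, num):
--         if arr[x][y] == 0:
--             return
--         arr[x][y] = 0
--
--         for i in range(4):
--             nx = x + dx[i]
--             ny = y + dy[i]
--
--             if 0 <= nx < n and 0 <= ny < m:
--                 if arr[nx][ny] != 0 and arr[nx][ny] == num:
--                     dfs(arr, nx, ny, num)
--
--     for i in range(n):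
--         for j in range(m):
--             if images[i][j] != 0:
--                 dfs(images, i, j, images[i][j])
--                 count += 1
--     return count
-- ===== SOURCE B (Python) =====
-- def solution(n, m, images):
--     # Iterative flood fill with an explicit stack instead of A's recursive dfs.
--     # Mutates images in place exactly like A (every visited cell becomes 0).
--     count = 0
--     for i in range(n):
--         for j in range(m):
--             seed = images[i][j]
--             if seed != 0:
--                 count += 1
--                 stack = [(i, j)]
--                 while stack:
--                     x, y = stack.pop()
--                     if images[x][y] == 0:
--                         continue
--                     images[x][y] = 0
--                     for nx, ny in ((x, y - 1), (x - 1, y), (x, y + 1), (x + 1, y)):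
--                         if 0 <= nx < n and 0 <= ny < m and images[nx][ny] == seed:
--                             stack.append((nx, ny))
--     return count
-- ===== Notes on version B (the rewrite author's own statement) =====
-- stated objective: alternative
-- what changed: The recursive dfs flood fill is replaced by an iterative flood fill with an explicit LIFO stack: each popped nonzero cell is zeroed and its in-bounds equal-valued neighbours are pushed, so there is no recursion (and no Python recursion-depth limit pressure); the outer counting loop and the in-place zeroing of images are kept.
import Mathlib
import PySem

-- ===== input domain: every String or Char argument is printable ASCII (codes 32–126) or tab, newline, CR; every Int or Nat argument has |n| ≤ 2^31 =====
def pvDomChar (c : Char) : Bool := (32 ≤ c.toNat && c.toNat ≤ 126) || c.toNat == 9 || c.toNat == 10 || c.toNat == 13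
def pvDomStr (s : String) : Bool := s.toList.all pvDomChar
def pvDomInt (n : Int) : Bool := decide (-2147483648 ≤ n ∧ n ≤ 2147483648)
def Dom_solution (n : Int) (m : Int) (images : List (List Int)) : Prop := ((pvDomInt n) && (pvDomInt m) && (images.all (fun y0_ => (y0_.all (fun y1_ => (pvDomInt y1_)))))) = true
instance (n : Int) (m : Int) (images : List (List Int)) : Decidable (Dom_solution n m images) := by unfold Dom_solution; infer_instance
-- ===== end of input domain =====

-- B replaces A's recursive dfs flood fill by an iterative flood fill with an explicit stack
-- (same counting loop, same in-place zeroing of images); equivalence proved for the return value.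

-- Shared grid primitives used by both ports. Reads/writes in the Python are always
-- guarded in-bounds with nonnegative indices on inputs satisfying Pre_solution, so the
-- out-of-range default 0 / no-op write below is never hit there (exact on Pre_solution).
def getRow : List Int → Nat → Int
  | [], _ => 0
  | v :: _, 0 => v
  | _ :: r, k + 1 => getRow r k

def getGrid : List (List Int) → Nat → Nat → Int
  | [], _, _ => 0
  | r :: _, 0, k => getRow r k
  | _ :: a, i + 1, k => getGrid a i k

-- arr[x][y] (guarded in-bounds in the Pythons)
def cellGet (a : List (List Int)) (x y : Int) : Int :=
  if 0 ≤ x ∧ 0 ≤ y then getGrid a x.toNat y.toNat else 0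

def setRow : List Int → Nat → Int → List Int
  | [], _, _ => []
  | _ :: r, 0, v => v :: r
  | u :: r, k + 1, v => u :: setRow r k v

def modGrid : List (List Int) → Nat → Nat → Int → List (List Int)
  | [], _, _, _ => []
  | r :: a, 0, k, v => setRow r k v :: a
  | r :: a, i + 1, k, v => r :: modGrid a i k v

-- arr[x][y] = v (guarded in-bounds in the Pythons)
def cellSet (a : List (List Int)) (x y v : Int) : List (List Int) :=
  if 0 ≤ x ∧ 0 ≤ y then modGrid a x.toNat y.toNat v else a

-- number of nonzero cells (used only as fuel for the recursions; see the fuel lemmas below)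
def nzRow (r : List Int) : Nat := (r.filter (fun v => decide (v ≠ 0))).length
def nz (a : List (List Int)) : Nat := (a.map nzRow).sum

-- ===== PORT A =====
-- A's recursive dfs; fuel makes the recursion structural, nz arr + 1 at the call site is
-- always enough (dfsA_fuel_eq below), so the cut-off branch is never taken.
-- The `for i in range(4)` loop over dx/dy = [(1,0),(0,1),(-1,0),(0,-1)] is unrolled.
def dfsA (n m : Int) (fuel : Nat) (arr : List (List Int)) (x y num : Int) : List (List Int) :=
  match fuel with
  | 0 => arr
  | fuel + 1 =>
    if cellGet arr x y = 0 then arr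
    else
      let a0 := cellSet arr x y 0
      let a1 := if 0 ≤ x + 1 ∧ x + 1 < n ∧ 0 ≤ y ∧ y < m ∧ cellGet a0 (x + 1) y ≠ 0 ∧ cellGet a0 (x + 1) y = num then dfsA n m fuel a0 (x + 1) y num else a0
      let a2 := if 0 ≤ x ∧ x < n ∧ 0 ≤ y + 1 ∧ y + 1 < m ∧ cellGet a1 x (y + 1) ≠ 0 ∧ cellGet a1 x (y + 1) = num then dfsA n m fuel a1 x (y + 1) num else a1
      let a3 := if 0 ≤ x - 1 ∧ x - 1 < n ∧ 0 ≤ y ∧ y < m ∧ cellGet a2 (x - 1) y ≠ 0 ∧ cellGet a2 (x - 1) y = num then dfsA n m fuel a2 (x - 1) y num else a2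
      let a4 := if 0 ≤ x ∧ x < n ∧ 0 ≤ y - 1 ∧ y - 1 < m ∧ cellGet a3 x (y - 1) ≠ 0 ∧ cellGet a3 x (y - 1) = num then dfsA n m fuel a3 x (y - 1) num else a3
      a4

def solution (n : Int) (m : Int) (images : List (List Int)) : Int :=
  (List.foldl (fun (st : List (List Int) × Int) (i : Int) =>
      List.foldl (fun (st : List (List Int) × Int) (j : Int) =>
          if cellGet st.1 i j ≠ 0 then
            (dfsA n m (nz st.1 + 1) st.1 i j (cellGet st.1 i j), st.2 + 1)
          else st)
        st (PySem.List.pyRange 0 m 1))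
    (images, 0) (PySem.List.pyRange 0 n 1)).2

-- ===== PORT B =====
-- Source B's push condition for a neighbour (in-bounds and equal to the seed)
def pushElig (n m seed : Int) (a0 : List (List Int)) (p : Int × Int) : Bool :=
  decide (0 ≤ p.1 ∧ p.1 < n ∧ 0 ≤ p.2 ∧ p.2 < m ∧ cellGet a0 p.1 p.2 = seed)

-- Source B's while-stack loop; the list head is the stack top, so Source B's pushes
-- (x,y-1),(x-1,y),(x,y+1),(x+1,y) appear here as the reversed list prepended.
-- Fuel makes the loop structural; 5*nz+stack length+1 is always enough (runB_fuel_eq).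
def runB (n m : Int) (fuel : Nat) (arr : List (List Int)) (stack : List (Int × Int)) (seed : Int) : List (List Int) :=
  match fuel with
  | 0 => arr
  | fuel + 1 =>
    match stack with
    | [] => arr
    | (x, y) :: rest =>
      if cellGet arr x y = 0 then runB n m fuel arr rest seed
      else
        let a0 := cellSet arr x y 0
        runB n m fuel a0
          (List.filter (pushElig n m seed a0) [(x + 1, y), (x, y + 1), (x - 1, y), (x, y - 1)] ++ rest) seed

def solution_alt (n : Int) (m : Int) (images : List (List Int)) : Int :=
  (List.foldl (fun (st : List (List Int) × Int) (i : Int) =>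
      List.foldl (fun (st : List (List Int) × Int) (j : Int) =>
          if cellGet st.1 i j ≠ 0 then
            (runB n m (5 * nz st.1 + 2) st.1 [(i, j)] (cellGet st.1 i j), st.2 + 1)
          else st)
        st (PySem.List.pyRange 0 m 1))
    (images, 0) (PySem.List.pyRange 0 n 1)).2

-- ===== PRECONDITION & SPEC =====
-- Exactly the inputs on which the Python A returns (otherwise images[i][j] raises
-- IndexError): unless the inner loop is empty (m ≤ 0), the first n rows must exist
-- and each have at least m entries.
def Pre_solution (n : Int) (m : Int) (images : List (List Int)) : Prop :=
  0 < m → (n ≤ (images.length : Int) ∧ ∀ r ∈ images.take n.toNat, m ≤ (r.length : Int))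
instance (n : Int) (m : Int) (images : List (List Int)) : Decidable (Pre_solution n m images) := by
  unfold Pre_solution; infer_instance

def pvWitness_solution : Int × Int × List (List Int) := (2, 2, [[1, 1], [0, 2]])

def Spec_solution (n : Int) (m : Int) (images : List (List Int)) (out : Int) : Prop := out = solution_alt n m images
instance (n : Int) (m : Int) (images : List (List Int)) (out : Int) : Decidable (Spec_solution n m images out) := by unfold Spec_solution; infer_instance

-- ===== CLAIM (what is proved, stated in full; the proofs are below) =====
def Claim_equal_solution : Prop := ∀ (n : Int) (m : Int) (images : List (List Int)), Dom_solution n m images → Pre_solution n m images → Spec_solution n m images (solution n m images)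

-- ===== LEMMAS AND PROOFS =====

-- proof-only wrappers: the canonical sufficient fuels
def dfsT (n m : Int) (a : List (List Int)) (x y num : Int) : List (List Int) :=
  dfsA n m (nz a + 1) a x y num

def runT (n m : Int) (a : List (List Int)) (s : List (Int × Int)) (seed : Int) : List (List Int) :=
  runB n m (5 * nz a + s.length + 1) a s seed

-- one neighbour step of A's dfs body
def dstep (n m : Int) (fuel : Nat) (b : List (List Int)) (nx ny num : Int) : List (List Int) :=
  if 0 ≤ nx ∧ nx < n ∧ 0 ≤ ny ∧ ny < m ∧ cellGet b nx ny ≠ 0 ∧ cellGet b nx ny = num then dfsA n m fuel b nx ny num else b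

def dstepT (n m : Int) (b : List (List Int)) (p : Int × Int) (num : Int) : List (List Int) :=
  if 0 ≤ p.1 ∧ p.1 < n ∧ 0 ≤ p.2 ∧ p.2 < m ∧ cellGet b p.1 p.2 ≠ 0 ∧ cellGet b p.1 p.2 = num then dfsT n m b p.1 p.2 num else b

def ZeroOnly (a b : List (List Int)) : Prop :=
  ∀ p q : Int, cellGet b p q = cellGet a p q ∨ cellGet b p q = 0

theorem dfsA_succ (n m : Int) (fuel : Nat) (arr : List (List Int)) (x y num : Int) :
    dfsA n m (fuel + 1) arr x y num =
      if cellGet arr x y = 0 then arr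
      else dstep n m fuel (dstep n m fuel (dstep n m fuel (dstep n m fuel (cellSet arr x y 0) (x + 1) y num) x (y + 1) num) (x - 1) y num) x (y - 1) num := rfl

theorem runB_cons (n m : Int) (fuel : Nat) (a : List (List Int)) (x y : Int) (rest : List (Int × Int)) (seed : Int) :
    runB n m (fuel + 1) a ((x, y) :: rest) seed =
      if cellGet a x y = 0 then runB n m fuel a rest seed
      else runB n m fuel (cellSet a x y 0)
        (List.filter (pushElig n m seed (cellSet a x y 0)) [(x + 1, y), (x, y + 1), (x - 1, y), (x, y - 1)] ++ rest) seed := rfl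

theorem runB_nil (n m : Int) (fuel : Nat) (a : List (List Int)) (seed : Int) :
    runB n m fuel a [] seed = a := by cases fuel <;> rfl


theorem nzRow_cons (v : Int) (r : List Int) :
    nzRow (v :: r) = (if v = 0 then 0 else 1) + nzRow r := by
  by_cases h : v = 0 <;> simp [nzRow, h, Nat.add_comm]

theorem nz_cons (r : List Int) (a : List (List Int)) : nz (r :: a) = nzRow r + nz a := by
  simp [nz]

theorem getRow_of_nzRow_zero (r : List Int) (k : Nat) (h : nzRow r = 0) : getRow r k = 0 := by
  induction r generalizing k with
  | nil => rfl
  | cons v r ih =>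
    rw [nzRow_cons] at h
    by_cases hv : v = 0
    · cases k with
      | zero => exact hv
      | succ k => exact ih k (by omega)
    · simp only [hv, if_false] at h
      omega

theorem getGrid_of_nz_zero (a : List (List Int)) (i k : Nat) (h : nz a = 0) : getGrid a i k = 0 := by
  induction a generalizing i with
  | nil => rfl
  | cons r a ih =>
    rw [nz_cons] at h
    cases i with
    | zero => exact getRow_of_nzRow_zero r k (by omega)
    | succ i => exact ih i (by omega)

theorem cellGet_of_nz_zero (a : List (List Int)) (x y : Int) (h : nz a = 0) : cellGet a x y = 0 := by
  unfold cellGet; split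
  · exact getGrid_of_nz_zero a _ _ h
  · rfl

theorem nzRow_setRow_le (r : List Int) (k : Nat) : nzRow (setRow r k 0) ≤ nzRow r := by
  induction r generalizing k with
  | nil => exact le_refl _
  | cons v r ih =>
    cases k with
    | zero =>
      show nzRow ((0:Int) :: r) ≤ _
      rw [nzRow_cons, nzRow_cons]
      by_cases hv : v = 0 <;> simp [hv]
    | succ k => show nzRow (v :: setRow r k 0) ≤ _; rw [nzRow_cons, nzRow_cons]; exact Nat.add_le_add_left (ih k) _

theorem nzRow_setRow_lt (r : List Int) (k : Nat) (h : getRow r k ≠ 0) : nzRow (setRow r k 0) < nzRow r := by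
  induction r generalizing k with
  | nil => exact absurd rfl h
  | cons v r ih =>
    cases k with
    | zero =>
      show nzRow ((0:Int) :: r) < _
      rw [nzRow_cons, nzRow_cons]
      have hv : v ≠ 0 := h
      simp [hv]
    | succ k =>
      show nzRow (v :: setRow r k 0) < _
      rw [nzRow_cons, nzRow_cons]
      exact Nat.add_lt_add_left (ih k h) _

theorem nz_modGrid_le (a : List (List Int)) (i k : Nat) : nz (modGrid a i k 0) ≤ nz a := by
  induction a generalizing i with
  | nil => exact le_refl _
  | cons r a ih =>
    cases i with
    | zero => show nz (setRow r k 0 :: a) ≤ _; rw [nz_cons, nz_cons]; exact Nat.add_le_add_right (nzRow_setRow_le r k) _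
    | succ i => show nz (r :: modGrid a i k 0) ≤ _; rw [nz_cons, nz_cons]; exact Nat.add_le_add_left (ih i) _

theorem nz_modGrid_lt (a : List (List Int)) (i k : Nat) (h : getGrid a i k ≠ 0) : nz (modGrid a i k 0) < nz a := by
  induction a generalizing i with
  | nil => exact absurd rfl h
  | cons r a ih =>
    cases i with
    | zero => show nz (setRow r k 0 :: a) < _; rw [nz_cons, nz_cons]; exact Nat.add_lt_add_right (nzRow_setRow_lt r k h) _
    | succ i => show nz (r :: modGrid a i k 0) < _; rw [nz_cons, nz_cons]; exact Nat.add_lt_add_left (ih i h) _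

theorem cellGet_pos (a : List (List Int)) (x y : Int) (h : cellGet a x y ≠ 0) : 0 ≤ x ∧ 0 ≤ y := by
  unfold cellGet at h; split at h
  · assumption
  · exact absurd rfl h

theorem nz_cellSet_le (a : List (List Int)) (x y : Int) : nz (cellSet a x y 0) ≤ nz a := by
  unfold cellSet; split
  · exact nz_modGrid_le a _ _
  · exact le_refl _

theorem nz_cellSet_lt (a : List (List Int)) (x y : Int) (h : cellGet a x y ≠ 0) :
    nz (cellSet a x y 0) < nz a := by
  have hxy := cellGet_pos a x y h
  unfold cellGet at h; rw [if_pos hxy] at h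
  unfold cellSet; rw [if_pos hxy]
  exact nz_modGrid_lt a _ _ h

theorem getRow_setRow (r : List Int) (k q : Nat) (v : Int) :
    getRow (setRow r k v) q = getRow r q ∨ getRow (setRow r k v) q = v := by
  induction r generalizing k q with
  | nil => left; rfl
  | cons u r ih =>
    cases k with
    | zero =>
      cases q with
      | zero => right; rfl
      | succ q => left; rfl
    | succ k =>
      cases q with
      | zero => left; rfl
      | succ q => exact ih k q

theorem getGrid_modGrid (a : List (List Int)) (i k p q : Nat) (v : Int) :
    getGrid (modGrid a i k v) p q = getGrid a p q ∨ getGrid (modGrid a i k v) p q = v := by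
  induction a generalizing i p with
  | nil => left; rfl
  | cons r a ih =>
    cases i with
    | zero =>
      cases p with
      | zero => exact getRow_setRow r k q v
      | succ p => left; rfl
    | succ i =>
      cases p with
      | zero => left; rfl
      | succ p => exact ih i p

theorem cellSet_zeroOnly (a : List (List Int)) (x y : Int) : ZeroOnly a (cellSet a x y 0) := by
  intro p q
  unfold cellSet; split
  · unfold cellGet; split
    · exact getGrid_modGrid a _ _ _ _ 0
    · right; rfl
  · left; rfl

theorem zeroOnly_refl (a : List (List Int)) : ZeroOnly a a := fun _ _ => Or.inl rfl

theorem zeroOnly_trans {a b c : List (List Int)} (h1 : ZeroOnly a b) (h2 : ZeroOnly b c) : ZeroOnly a c := by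
  intro p q
  rcases h2 p q with h | h
  · rw [h]; exact h1 p q
  · right; exact h


theorem dfsA_nz_le (n m num : Int) : ∀ (fuel : Nat) (a : List (List Int)) (x y : Int),
    nz (dfsA n m fuel a x y num) ≤ nz a := by
  intro fuel
  induction fuel with
  | zero => intro a x y; exact le_refl _
  | succ fuel ih =>
    intro a x y
    rw [dfsA_succ]
    by_cases hc : cellGet a x y = 0
    · rw [if_pos hc]
    · rw [if_neg hc]
      have hstep : ∀ (b : List (List Int)) (nx ny : Int), nz (dstep n m fuel b nx ny num) ≤ nz b := by
        intro b nx ny; unfold dstep; split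
        · exact ih b nx ny
        · exact le_refl _
      calc nz (dstep n m fuel (dstep n m fuel (dstep n m fuel (dstep n m fuel (cellSet a x y 0) (x + 1) y num) x (y + 1) num) (x - 1) y num) x (y - 1) num)
          ≤ nz (dstep n m fuel (dstep n m fuel (dstep n m fuel (cellSet a x y 0) (x + 1) y num) x (y + 1) num) (x - 1) y num) := hstep _ _ _
        _ ≤ nz (dstep n m fuel (dstep n m fuel (cellSet a x y 0) (x + 1) y num) x (y + 1) num) := hstep _ _ _
        _ ≤ nz (dstep n m fuel (cellSet a x y 0) (x + 1) y num) := hstep _ _ _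
        _ ≤ nz (cellSet a x y 0) := hstep _ _ _
        _ ≤ nz a := nz_cellSet_le a x y

theorem dfsA_zeroOnly (n m num : Int) : ∀ (fuel : Nat) (a : List (List Int)) (x y : Int),
    ZeroOnly a (dfsA n m fuel a x y num) := by
  intro fuel
  induction fuel with
  | zero => intro a x y; exact zeroOnly_refl a
  | succ fuel ih =>
    intro a x y
    rw [dfsA_succ]
    by_cases hc : cellGet a x y = 0
    · rw [if_pos hc]; exact zeroOnly_refl a
    · rw [if_neg hc]
      have hstep : ∀ (b : List (List Int)) (nx ny : Int), ZeroOnly b (dstep n m fuel b nx ny num) := by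
        intro b nx ny; unfold dstep; split
        · exact ih b nx ny
        · exact zeroOnly_refl b
      exact zeroOnly_trans (cellSet_zeroOnly a x y)
        (zeroOnly_trans (hstep _ _ _) (zeroOnly_trans (hstep _ _ _) (zeroOnly_trans (hstep _ _ _) (hstep _ _ _))))

theorem dstep_nz_le (n m num : Int) (fuel : Nat) (b : List (List Int)) (nx ny : Int) :
    nz (dstep n m fuel b nx ny num) ≤ nz b := by
  unfold dstep; split
  · exact dfsA_nz_le n m num fuel b nx ny
  · exact le_refl _

theorem dfsA_allZero (n m num : Int) (a : List (List Int)) (x y : Int) (h : nz a = 0) :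
    ∀ (fuel : Nat), dfsA n m fuel a x y num = a := by
  intro fuel
  cases fuel with
  | zero => rfl
  | succ fuel => rw [dfsA_succ, if_pos (cellGet_of_nz_zero a x y h)]

theorem dfsA_fuel_eq (n m num : Int) : ∀ (f g : Nat) (a : List (List Int)) (x y : Int),
    nz a ≤ f → nz a ≤ g → dfsA n m f a x y num = dfsA n m g a x y num := by
  intro f
  induction f with
  | zero =>
    intro g a x y hf hg
    have h0 : nz a = 0 := by omega
    rw [dfsA_allZero n m num a x y h0 0, dfsA_allZero n m num a x y h0 g]
  | succ f ihf =>
    intro g a x y hf hg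
    cases g with
    | zero =>
      have h0 : nz a = 0 := by omega
      rw [dfsA_allZero n m num a x y h0 (f + 1), dfsA_allZero n m num a x y h0 0]
    | succ g =>
      rw [dfsA_succ, dfsA_succ]
      by_cases hc : cellGet a x y = 0
      · rw [if_pos hc, if_pos hc]
      · rw [if_neg hc, if_neg hc]
        have hlt : nz (cellSet a x y 0) < nz a := nz_cellSet_lt a x y hc
        have hstep : ∀ (b : List (List Int)) (nx ny : Int), nz b ≤ f → nz b ≤ g →
            dstep n m f b nx ny num = dstep n m g b nx ny num := by
          intro b nx ny h1 h2; unfold dstep; split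
          · exact ihf g b nx ny h1 h2
          · rfl
        have h0f : nz (cellSet a x y 0) ≤ f := by omega
        have h0g : nz (cellSet a x y 0) ≤ g := by omega
        rw [hstep _ _ _ h0f h0g]
        have h1f : nz (dstep n m g (cellSet a x y 0) (x + 1) y num) ≤ f :=
          le_trans (dstep_nz_le n m num g _ _ _) h0f
        have h1g : nz (dstep n m g (cellSet a x y 0) (x + 1) y num) ≤ g :=
          le_trans (dstep_nz_le n m num g _ _ _) h0g
        rw [hstep _ _ _ h1f h1g]
        have h2f : nz (dstep n m g (dstep n m g (cellSet a x y 0) (x + 1) y num) x (y + 1) num) ≤ f :=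
          le_trans (dstep_nz_le n m num g _ _ _) h1f
        have h2g : nz (dstep n m g (dstep n m g (cellSet a x y 0) (x + 1) y num) x (y + 1) num) ≤ g :=
          le_trans (dstep_nz_le n m num g _ _ _) h1g
        rw [hstep _ _ _ h2f h2g]
        have h3f : nz (dstep n m g (dstep n m g (dstep n m g (cellSet a x y 0) (x + 1) y num) x (y + 1) num) (x - 1) y num) ≤ f :=
          le_trans (dstep_nz_le n m num g _ _ _) h2f
        have h3g : nz (dstep n m g (dstep n m g (dstep n m g (cellSet a x y 0) (x + 1) y num) x (y + 1) num) (x - 1) y num) ≤ g :=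
          le_trans (dstep_nz_le n m num g _ _ _) h2g
        rw [hstep _ _ _ h3f h3g]

theorem runB_fuel_eq (n m seed : Int) : ∀ (f g : Nat) (a : List (List Int)) (s : List (Int × Int)),
    5 * nz a + s.length ≤ f → 5 * nz a + s.length ≤ g →
    runB n m f a s seed = runB n m g a s seed := by
  intro f
  induction f with
  | zero =>
    intro g a s hf hg
    have hs : s = [] := List.length_eq_zero_iff.mp (by omega)
    subst hs
    rw [runB_nil, runB_nil]
  | succ f ihf =>
    intro g a s hf hg
    cases s with
    | nil => rw [runB_nil, runB_nil]
    | cons p rest =>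
      obtain ⟨x, y⟩ := p
      cases g with
      | zero => simp at hg
      | succ g =>
        rw [runB_cons, runB_cons]
        by_cases hc : cellGet a x y = 0
        · rw [if_pos hc, if_pos hc]
          apply ihf g a rest (by simp at hf; omega) (by simp at hg; omega)
        · rw [if_neg hc, if_neg hc]
          have hlt : nz (cellSet a x y 0) < nz a := nz_cellSet_lt a x y hc
          have hpl : (List.filter (pushElig n m seed (cellSet a x y 0)) [(x + 1, y), (x, y + 1), (x - 1, y), (x, y - 1)]).length ≤ 4 := by
            have := List.length_filter_le (pushElig n m seed (cellSet a x y 0)) [(x + 1, y), (x, y + 1), (x - 1, y), (x, y - 1)]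
            simpa using this
          apply ihf g
          · simp only [List.length_append]; simp at hf; omega
          · simp only [List.length_append]; simp at hg; omega


theorem runT_cons_skip (n m seed x y : Int) (a : List (List Int)) (s : List (Int × Int))
    (hc : cellGet a x y = 0) : runT n m a ((x, y) :: s) seed = runT n m a s seed := by
  unfold runT
  simp only [List.length_cons]
  rw [runB_cons, if_pos hc]
  rfl

theorem runT_cons_go (n m seed x y : Int) (a : List (List Int)) (s : List (Int × Int))
    (hc : cellGet a x y ≠ 0) :
    runT n m a ((x, y) :: s) seed =
      runT n m (cellSet a x y 0)
        (List.filter (pushElig n m seed (cellSet a x y 0)) [(x + 1, y), (x, y + 1), (x - 1, y), (x, y - 1)] ++ s) seed := by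
  unfold runT
  simp only [List.length_cons]
  rw [runB_cons, if_neg hc]
  have hlt : nz (cellSet a x y 0) < nz a := nz_cellSet_lt a x y hc
  have hpl : (List.filter (pushElig n m seed (cellSet a x y 0)) [(x + 1, y), (x, y + 1), (x - 1, y), (x, y - 1)]).length ≤ 4 := by
    have := List.length_filter_le (pushElig n m seed (cellSet a x y 0)) [(x + 1, y), (x, y + 1), (x - 1, y), (x, y - 1)]
    simpa using this
  apply runB_fuel_eq
  · simp only [List.length_append]; omega
  · simp only [List.length_append]; omega

theorem dstepT_nz_le (n m seed : Int) (b : List (List Int)) (p : Int × Int) :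
    nz (dstepT n m b p seed) ≤ nz b := by
  unfold dstepT; split
  · exact dfsA_nz_le n m seed _ b p.1 p.2
  · exact le_refl _

theorem dstep_eq_dstepT (n m seed : Int) (f : Nat) (b : List (List Int)) (nx ny : Int)
    (h : nz b ≤ f) : dstep n m f b nx ny seed = dstepT n m b (nx, ny) seed := by
  unfold dstep dstepT
  split
  · exact dfsA_fuel_eq n m seed f (nz b + 1) b nx ny h (by omega)
  · rfl

theorem chain_sim (n m seed : Int) (N : Nat)
    (ih : ∀ (a' : List (List Int)), nz a' ≤ N → ∀ (x y : Int) (s : List (Int × Int)),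
      runT n m a' ((x, y) :: s) seed = runT n m (dfsT n m a' x y seed) s seed)
    (a0 : List (List Int)) :
    ∀ (ps : List (Int × Int)) (b : List (List Int)) (s : List (Int × Int)),
      ZeroOnly a0 b → nz b ≤ N →
      (runT n m b (ps.filter (pushElig n m seed a0) ++ s) seed
          = runT n m (ps.foldl (fun b p => dstepT n m b p seed) b) s seed)
      ∧ ZeroOnly a0 (ps.foldl (fun b p => dstepT n m b p seed) b)
      ∧ nz (ps.foldl (fun b p => dstepT n m b p seed) b) ≤ N := by
  intro ps
  induction ps with
  | nil => intro b s hb hnz; exact ⟨rfl, hb, hnz⟩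
  | cons p ps ihp =>
    intro b s hb hnz
    obtain ⟨px, py⟩ := p
    rw [List.filter_cons, List.foldl_cons]
    by_cases hp : pushElig n m seed a0 (px, py) = true
    · rw [if_pos hp]
      unfold pushElig at hp
      rw [decide_eq_true_iff] at hp
      obtain ⟨h1, h2, h3, h4, h5⟩ := hp
      by_cases hc : cellGet b px py = 0
      · have hd : dstepT n m b (px, py) seed = b := by
          unfold dstepT
          rw [if_neg]
          intro hg
          exact hg.2.2.2.2.1 hc
        rw [hd]
        have hskip := runT_cons_skip n m seed px py b (ps.filter (pushElig n m seed a0) ++ s) hc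
        rw [List.cons_append, hskip]
        exact ihp b s hb hnz
      · have hbv : cellGet b px py = seed := by
          rcases hb px py with h | h
          · rw [h]; exact h5
          · exact absurd h hc
        have hd : dstepT n m b (px, py) seed = dfsT n m b px py seed := by
          unfold dstepT
          rw [if_pos ⟨h1, h2, h3, h4, hc, hbv⟩]
        rw [hd, List.cons_append]
        rw [ih b hnz px py (ps.filter (pushElig n m seed a0) ++ s)]
        have hzo : ZeroOnly a0 (dfsT n m b px py seed) :=
          zeroOnly_trans hb (dfsA_zeroOnly n m seed _ b px py)
        have hnz' : nz (dfsT n m b px py seed) ≤ N :=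
          le_trans (dfsA_nz_le n m seed _ b px py) hnz
        exact ihp (dfsT n m b px py seed) s hzo hnz'
    · rw [if_neg hp]
      have hd : dstepT n m b (px, py) seed = b := by
        unfold dstepT
        rw [if_neg]
        intro hg
        obtain ⟨h1, h2, h3, h4, h5, h6⟩ := hg
        apply hp
        unfold pushElig
        rw [decide_eq_true_iff]
        refine ⟨h1, h2, h3, h4, ?_⟩
        rcases hb px py with h | h
        · rw [← h]; exact h6
        · exact absurd h h5
      rw [hd]
      exact ihp b s hb hnz

theorem sim (n m seed : Int) :
    ∀ (N : Nat) (a : List (List Int)), nz a ≤ N → ∀ (x y : Int) (s : List (Int × Int)),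
      runT n m a ((x, y) :: s) seed = runT n m (dfsT n m a x y seed) s seed := by
  intro N
  induction N with
  | zero =>
    intro a ha x y s
    have hc : cellGet a x y = 0 := cellGet_of_nz_zero a x y (by omega)
    have hd : dfsT n m a x y seed = a := by
      unfold dfsT; rw [dfsA_succ, if_pos hc]
    rw [hd, runT_cons_skip n m seed x y a s hc]
  | succ N ihN =>
    intro a ha x y s
    by_cases hc : cellGet a x y = 0
    · have hd : dfsT n m a x y seed = a := by
        unfold dfsT; rw [dfsA_succ, if_pos hc]
      rw [hd, runT_cons_skip n m seed x y a s hc]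
    · have hlt : nz (cellSet a x y 0) < nz a := nz_cellSet_lt a x y hc
      have ha0 : nz (cellSet a x y 0) ≤ N := by omega
      rw [runT_cons_go n m seed x y a s hc]
      obtain ⟨heq, -, -⟩ := chain_sim n m seed N ihN (cellSet a x y 0)
        [(x + 1, y), (x, y + 1), (x - 1, y), (x, y - 1)] (cellSet a x y 0) s
        (zeroOnly_refl _) ha0
      rw [heq]
      have hchain : dfsT n m a x y seed =
          List.foldl (fun b p => dstepT n m b p seed) (cellSet a x y 0)
            [(x + 1, y), (x, y + 1), (x - 1, y), (x, y - 1)] := by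
        unfold dfsT
        rw [dfsA_succ, if_neg hc]
        simp only [List.foldl_cons, List.foldl_nil]
        have h0 : nz (cellSet a x y 0) ≤ nz a := le_of_lt hlt
        rw [dstep_eq_dstepT n m seed (nz a) _ _ _ h0]
        have h1 : nz (dstepT n m (cellSet a x y 0) (x + 1, y) seed) ≤ nz a :=
          le_trans (dstepT_nz_le n m seed _ _) h0
        rw [dstep_eq_dstepT n m seed (nz a) _ _ _ h1]
        have h2 : nz (dstepT n m (dstepT n m (cellSet a x y 0) (x + 1, y) seed) (x, y + 1) seed) ≤ nz a :=
          le_trans (dstepT_nz_le n m seed _ _) h1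
        rw [dstep_eq_dstepT n m seed (nz a) _ _ _ h2]
        have h3 : nz (dstepT n m (dstepT n m (dstepT n m (cellSet a x y 0) (x + 1, y) seed) (x, y + 1) seed) (x - 1, y) seed) ≤ nz a :=
          le_trans (dstepT_nz_le n m seed _ _) h2
        rw [dstep_eq_dstepT n m seed (nz a) _ _ _ h3]
      rw [hchain]

theorem foldl_ext_fun {α β : Type} (f g : β → α → β) (h : ∀ (s : β) (x : α), f s x = g s x) :
    ∀ (l : List α) (s : β), List.foldl f s l = List.foldl g s l := by
  intro l
  induction l with
  | nil => intro s; rfl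
  | cons x l ih => intro s; rw [List.foldl_cons, List.foldl_cons, h, ih]

theorem cell_eq (n m : Int) (st : List (List Int) × Int) (i j : Int) :
    (if cellGet st.1 i j ≠ 0 then (dfsA n m (nz st.1 + 1) st.1 i j (cellGet st.1 i j), st.2 + 1) else st)
      = (if cellGet st.1 i j ≠ 0 then (runB n m (5 * nz st.1 + 2) st.1 [(i, j)] (cellGet st.1 i j), st.2 + 1) else st) := by
  by_cases hc : cellGet st.1 i j = 0
  · simp [hc]
  · rw [if_pos hc, if_pos hc]
    have h1 : runB n m (5 * nz st.1 + 2) st.1 [(i, j)] (cellGet st.1 i j)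
        = runT n m st.1 [(i, j)] (cellGet st.1 i j) := by
      apply runB_fuel_eq <;> simp
    have h2 := sim n m (cellGet st.1 i j) (nz st.1) st.1 (le_refl _) i j []
    have h3 : runT n m (dfsT n m st.1 i j (cellGet st.1 i j)) [] (cellGet st.1 i j)
        = dfsT n m st.1 i j (cellGet st.1 i j) := runB_nil _ _ _ _ _
    rw [h1, h2, h3]
    rfl

theorem solution_eq_alt (n m : Int) (images : List (List Int)) :
    solution n m images = solution_alt n m images := by
  unfold solution solution_alt
  apply congrArg Prod.snd
  apply foldl_ext_fun
  intro st i
  apply foldl_ext_fun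
  intro st' j
  exact cell_eq n m st' i j

-- ===== VERDICT (by name: the statement is the Claim_ definition above) =====
theorem solution_spec : Claim_equal_solution := by
  intro n m images _ _
  unfold Spec_solution
  exact solution_eq_alt n m images
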